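-- pv_equiv track=rewrite | github.com/SneekZ/Sign-App-Web | backend/modules/passwords_finder.py | get_passwords_finder
-- ===== SOURCE A (Python) =====
-- def get_passwords_finder(n=11):
--     passwords = []
--     for i in range(1, n):
--         if not passwords:
--             passwords.append(str(i))
--         else:
--             passwords.append(passwords[-1] + str(i)[-1])
--     for password in passwords[:]:
--         passwords.append(password[::-1])
--     return passwords
-- ===== SOURCE B (Python) =====
-- def get_passwords_finder(n=11):
--     s = "".join(str(i)[-1] for i in range(1, n))
--     passwords = [s[:k] for k in range(1, len(s) + 1)]
--     return passwords + [p[::-1] for p in passwords]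
-- ===== Notes on version B (the rewrite author's own statement) =====
-- stated objective: simpler
-- what changed: A grows each password from the previous list element inside a stateful loop (and a second append loop for reverses); B builds the full digit string once with a join, takes growing slice prefixes with a comprehension, and concatenates the list of their reverses.
import Mathlib
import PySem

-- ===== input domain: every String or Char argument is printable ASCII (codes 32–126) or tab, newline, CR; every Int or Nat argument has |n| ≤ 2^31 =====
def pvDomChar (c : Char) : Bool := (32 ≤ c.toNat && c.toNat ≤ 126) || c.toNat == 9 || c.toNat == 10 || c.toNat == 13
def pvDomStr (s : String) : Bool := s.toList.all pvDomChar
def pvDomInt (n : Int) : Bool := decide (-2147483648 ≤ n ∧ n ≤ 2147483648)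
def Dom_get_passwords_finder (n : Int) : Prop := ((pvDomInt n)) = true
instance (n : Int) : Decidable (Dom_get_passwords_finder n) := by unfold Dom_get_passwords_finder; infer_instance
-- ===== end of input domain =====

-- B replaces A's stateful "previous element + one char" accumulator by building the digit
-- string once and slicing growing prefixes (objective: simpler decomposition, same cost).

-- shared helper: Python's s[-1] as a 1-char string; the "" branch is Python's IndexError
-- (unreachable here: str(i) is never empty)
def pyLastChar (s : String) : String :=
  match PySem.Str.pyGet? s (-1) with
  | some c => String.singleton c
  | none => ""

-- ===== PORT A =====
def get_passwords_finder (n : Int) : List String :=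
  let passwords := (PySem.List.pyRange 1 n 1).foldl
    (fun passwords i =>
      if passwords = [] then passwords ++ [PySem.Int.toStr i]
      else passwords ++ [PySem.List.pyGetD passwords (-1) "" ++ pyLastChar (PySem.Int.toStr i)])
    []
  (PySem.List.slice passwords none none).foldl
    (fun acc password => acc ++ [(PySem.Str.slice? password none none (-1)).getD ""]) passwords

-- ===== PORT B =====
def get_passwords_finder_alt (n : Int) : List String :=
  let s := PySem.Str.join "" ((PySem.List.pyRange 1 n 1).map (fun i => pyLastChar (PySem.Int.toStr i)))
  let passwords := (PySem.List.pyRange 1 (PySem.Str.len s + 1) 1).map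
    (fun k => PySem.Str.slice s none (some k))
  passwords ++ passwords.map (fun p => (PySem.Str.slice? p none none (-1)).getD "")

-- ===== PRECONDITION & SPEC =====
def Spec_get_passwords_finder (n : Int) (out : List String) : Prop := out = get_passwords_finder_alt n
instance (n : Int) (out : List String) : Decidable (Spec_get_passwords_finder n out) := by unfold Spec_get_passwords_finder; infer_instance

-- ===== CLAIM (what is proved, stated in full; the proofs are below) =====
def Claim_equal_get_passwords_finder : Prop := ∀ (n : Int), Dom_get_passwords_finder n → Spec_get_passwords_finder n (get_passwords_finder n)

-- ===== LEMMAS AND PROOFS =====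

-- the last character of str(i), as a Char
def lastDigitChar (i : Int) : Char := (PySem.Int.toChars i).getLastD ' '

-- the list A's first loop builds, abstractly: successive extensions of t by one digit char
def grow (t : String) : List Int → List String
  | [] => []
  | i :: is => (t ++ pyLastChar (PySem.Int.toStr i)) :: grow (t ++ pyLastChar (PySem.Int.toStr i)) is

lemma toChars_ne_nil (i : Int) : PySem.Int.toChars i ≠ [] := by
  unfold PySem.Int.toChars
  split
  · simp
  · have : 0 < (Nat.toDigits 10 i.toNat).length := Nat.length_toDigits_pos
    intro h; simp [h] at this

lemma pyLastChar_toStr (i : Int) : pyLastChar (PySem.Int.toStr i) = String.singleton (lastDigitChar i) := by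
  unfold pyLastChar lastDigitChar
  rw [show PySem.Str.pyGet? (PySem.Int.toStr i) (-1)
      = PySem.List.pyGet? (PySem.Int.toStr i).toList (-1) by simp [pysem]]
  rw [PySem.List.pyGet?_neg_one, PySem.Int.toList_toStr]
  rcases h : (PySem.Int.toChars i).getLast? with _ | c
  · exact absurd (List.getLast?_eq_none_iff.mp h) (toChars_ne_nil i)
  · rw [List.getLastD_eq_getLast?, h]
    rfl

lemma pyLastChar_toStr_toList (i : Int) :
    (pyLastChar (PySem.Int.toStr i)).toList = [lastDigitChar i] := by
  rw [pyLastChar_toStr, String.toList_singleton]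

lemma grow_length (t : String) (l : List Int) : (grow t l).length = l.length := by
  induction l generalizing t with
  | nil => rfl
  | cons i is ih => simp [grow, ih]

lemma grow_getElem (t : String) (l : List Int) (j : Nat) (hj : j < l.length) :
    (grow t l)[j]'(by rw [grow_length]; exact hj)
      = t ++ String.ofList ((l.take (j + 1)).map lastDigitChar) := by
  induction l generalizing t j with
  | nil => simp at hj
  | cons i is ih =>
    cases j with
    | zero =>
      apply String.toList_inj.mp
      simp [grow, pyLastChar_toStr_toList]
    | succ j =>
      have := ih (t ++ pyLastChar (PySem.Int.toStr i)) j (by simpa using hj)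
      simp only [grow, List.getElem_cons_succ, this]
      apply String.toList_inj.mp
      simp [pyLastChar_toStr_toList]

-- A's first loop with a nonempty accumulator whose last element is t appends grow t l
lemma loopA (l : List Int) (acc : List String) (t : String)
    (hne : acc ≠ []) (hlast : PySem.List.pyGetD acc (-1) "" = t) :
    l.foldl (fun passwords i =>
      if passwords = [] then passwords ++ [PySem.Int.toStr i]
      else passwords ++ [PySem.List.pyGetD passwords (-1) "" ++ pyLastChar (PySem.Int.toStr i)]) acc
    = acc ++ grow t l := by
  induction l generalizing acc t with
  | nil => simp [grow]
  | cons i is ih =>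
    simp only [List.foldl_cons, if_neg hne, hlast]
    rw [ih (acc ++ [t ++ pyLastChar (PySem.Int.toStr i)]) (t ++ pyLastChar (PySem.Int.toStr i))
          (by simp) (PySem.List.pyGetD_neg_one_append_singleton ..)]
    simp [grow]

-- A's first loop computes grow "" (range)
lemma passA_eq (n : Int) :
    (PySem.List.pyRange 1 n 1).foldl
      (fun passwords i =>
        if passwords = [] then passwords ++ [PySem.Int.toStr i]
        else passwords ++ [PySem.List.pyGetD passwords (-1) "" ++ pyLastChar (PySem.Int.toStr i)]) []
    = grow "" (PySem.List.pyRange 1 n 1) := by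
  by_cases h : n ≤ 1
  · rw [PySem.List.pyRange_one_eq_nil h]; rfl
  · rw [PySem.List.pyRange_one_cons (by omega)]
    simp only [List.foldl_cons, if_true, List.nil_append]
    rw [show [PySem.Int.toStr 1] = ["1"] by decide]
    rw [loopA _ ["1"] "1" (by simp) (by decide)]
    have h1 : ("" : String) ++ pyLastChar (PySem.Int.toStr 1) = "1" := by decide
    simp [grow, h1]

-- B's prefix comprehension computes grow "" l when s is the joined digit string
lemma passB_eq (l : List Int) :
    (PySem.List.pyRange 1
        (PySem.Str.len (PySem.Str.join "" (l.map (fun i => pyLastChar (PySem.Int.toStr i)))) + 1) 1).map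
      (fun k => PySem.Str.slice (PySem.Str.join "" (l.map (fun i => pyLastChar (PySem.Int.toStr i)))) none (some k))
    = grow "" l := by
  set s := PySem.Str.join "" (l.map (fun i => pyLastChar (PySem.Int.toStr i))) with hs
  have hsl : s.toList = l.map lastDigitChar := by
    rw [hs, PySem.Str.toList_join]
    have : (l.map (fun i => pyLastChar (PySem.Int.toStr i))).map String.toList
        = (l.map lastDigitChar).map (fun c => [c]) := by
      simp [List.map_map, Function.comp, pyLastChar_toStr_toList]
    rw [show ("" : String).toList = [] from rfl, this, PySem.Chars.join_nil_singletons]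
  have hlen : PySem.Str.len s = (l.length : Int) := by
    rw [PySem.Str.len_eq, hsl, List.length_map]
  have hL : (PySem.List.pyRange 1 (PySem.Str.len s + 1) 1).length = l.length := by
    rw [PySem.List.length_pyRange_one, hlen]; omega
  apply List.ext_getElem
  · rw [List.length_map, hL, grow_length]
  · intro j h1 h2
    have hj : j < l.length := by rwa [List.length_map, hL] at h1
    rw [List.getElem_map, PySem.List.getElem_pyRange_one, grow_getElem "" l j hj]
    apply String.toList_inj.mp
    rw [PySem.Str.toList_slice, PySem.Chars.slice_eq_listSlice]
    rw [show (1 : Int) + (j : Int) = ((j + 1 : Nat) : Int) by push_cast; ring]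
    rw [PySem.List.slice_to_natCast, hsl, ← List.map_take]
    simp

-- ===== VERDICT (by name: the statement is the Claim_ definition above) =====
theorem get_passwords_finder_spec : Claim_equal_get_passwords_finder := by
  intro n _
  unfold Spec_get_passwords_finder
  simp only [get_passwords_finder, get_passwords_finder_alt, passA_eq, passB_eq,
    PySem.List.slice_none_none, PySem.List.foldl_append_singleton_eq_map]
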